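-- pv_equiv track=rewrite | github.com/GoodAI/goodai-ltm | goodai/ltm/mem/chunk_queue.py | _to_first_match
-- ===== SOURCE A (Python) =====
-- from typing import List, Dict, Optional
--
-- def _to_first_match(token_ids: List[int], sub_seqs: List[List[int]]):
--     nt = len(token_ids)
--     match_indexes = []
--     for sub_seq in sub_seqs:
--         ls = len(sub_seq)
--         if ls > 0:
--             for i in range(0, nt - ls):
--                 if token_ids[i:i + ls] == sub_seq:
--                     match_indexes.append((i, ls,))
--                     break
--     if len(match_indexes) == 0:
--         return token_ids
--     min_idx, min_len = min(match_indexes, key=lambda _t: _t[0])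
--     return token_ids[:min_idx + min_len]
-- ===== SOURCE B (Python) =====
-- def _to_first_match(token_ids, sub_seqs):
--     # Single left-to-right scan over positions: the first position where any
--     # sub-sequence matches (with the match ending strictly before the last
--     # token, as in the original's range bound) decides the cut; the first
--     # matching sub-sequence in list order at that position supplies the length.
--     nt = len(token_ids)
--     for i in range(nt):
--         for ss in sub_seqs:
--             ls = len(ss)
--             if 0 < ls and i + ls < nt and token_ids[i:i + ls] == ss:
--                 return token_ids[:i + ls]
--     return token_ids
-- ===== Notes on version B (the rewrite author's own statement) =====
-- stated objective: alternative
-- what changed: Replaces the per-sub-sequence scans that collect first-match pairs and take a min by index with a single ascending scan over positions that returns at the earliest matching position (earliest sub-sequence in list order breaking ties), eliminating the match_indexes list and the min pass.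
import Mathlib
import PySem

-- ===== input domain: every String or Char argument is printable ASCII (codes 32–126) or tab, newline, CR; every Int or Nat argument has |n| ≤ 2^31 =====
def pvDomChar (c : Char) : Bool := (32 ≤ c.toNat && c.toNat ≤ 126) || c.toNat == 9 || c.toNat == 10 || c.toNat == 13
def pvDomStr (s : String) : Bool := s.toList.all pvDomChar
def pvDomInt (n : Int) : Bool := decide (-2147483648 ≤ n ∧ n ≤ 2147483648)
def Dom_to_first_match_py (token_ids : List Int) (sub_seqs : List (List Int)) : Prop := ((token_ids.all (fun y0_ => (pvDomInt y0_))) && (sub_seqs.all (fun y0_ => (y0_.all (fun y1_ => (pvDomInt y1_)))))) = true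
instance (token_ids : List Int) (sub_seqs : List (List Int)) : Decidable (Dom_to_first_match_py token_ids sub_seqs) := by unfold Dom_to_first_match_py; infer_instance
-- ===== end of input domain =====

-- B replaces A's per-sub-sequence scans + min-by-index pass with one ascending scan over
-- positions that stops at the earliest match (same cost class; objective: alternative).


-- ===== PORT A =====
-- 'for i in range(0, nt - ls): if token_ids[i:i+ls] == sub_seq: append; break'
-- = first i in [i0, bound) with the slice equal; token_ids[i:i+ls] with 0 ≤ i
-- is exactly (token_ids.drop i).take ls (PySem.List.slice_natCast_add).
def aFind (token_ids sub_seq : List Int) (bound : Nat) (i : Nat) : Option Nat :=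
  if i < bound then
    if (token_ids.drop i).take sub_seq.length = sub_seq then some i
    else aFind token_ids sub_seq bound (i + 1)
  else none
termination_by bound - i

def to_first_match_py (token_ids : List Int) (sub_seqs : List (List Int)) : List Int :=
  let nt := token_ids.length
  let match_indexes := sub_seqs.foldl (fun acc sub_seq =>
    let ls := sub_seq.length
    if 0 < ls then
      match aFind token_ids sub_seq (nt - ls) 0 with
      | some i => acc ++ [(i, ls)]
      | none => acc
    else acc) []
  match match_indexes with
  | [] => token_ids
  | m :: rest =>
    -- min(match_indexes, key=fst): Python's min keeps the earliest on ties
    let best := rest.foldl (fun b t => if t.1 < b.1 then t else b) m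
    token_ids.take (best.1 + best.2)   -- token_ids[:min_idx+min_len], index ≥ 0

-- ===== PORT B =====
-- inner 'for ss in sub_seqs: if …: return token_ids[:i+ls]'
def altInner (token_ids : List Int) (i : Nat) : List (List Int) → Option (List Int)
  | [] => none
  | ss :: rest =>
    let ls := ss.length
    if 0 < ls ∧ i + ls < token_ids.length ∧ (token_ids.drop i).take ls = ss then
      some (token_ids.take (i + ls))
    else altInner token_ids i rest

-- outer 'for i in range(nt)'
def altLoop (token_ids : List Int) (sub_seqs : List (List Int)) (i : Nat) : List Int :=
  if i < token_ids.length then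
    match altInner token_ids i sub_seqs with
    | some r => r
    | none => altLoop token_ids sub_seqs (i + 1)
  else token_ids
termination_by token_ids.length - i

def to_first_match_py_alt (token_ids : List Int) (sub_seqs : List (List Int)) : List Int :=
  altLoop token_ids sub_seqs 0

-- ===== PRECONDITION & SPEC =====
def Spec_to_first_match_py (token_ids : List Int) (sub_seqs : List (List Int)) (out : List Int) : Prop := out = to_first_match_py_alt token_ids sub_seqs
instance (token_ids : List Int) (sub_seqs : List (List Int)) (out : List Int) : Decidable (Spec_to_first_match_py token_ids sub_seqs out) := by unfold Spec_to_first_match_py; infer_instance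

-- ===== CLAIM (what is proved, stated in full; the proofs are below) =====
def Claim_equal_to_first_match_py : Prop := ∀ (token_ids : List Int) (sub_seqs : List (List Int)), Dom_to_first_match_py token_ids sub_seqs → Spec_to_first_match_py token_ids sub_seqs (to_first_match_py token_ids sub_seqs)

-- ===== LEMMAS AND PROOFS =====

-- 'Good tok i ss': ss is nonempty and matches at position i with room before the last token
def Good (tok : List Int) (i : Nat) (ss : List Int) : Prop :=
  0 < ss.length ∧ i + ss.length < tok.length ∧ (tok.drop i).take ss.length = ss

-- the per-sub_seq entry A appends to match_indexes
def aEntry (tok : List Int) (ss : List Int) : Option (Nat × Nat) :=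
  if 0 < ss.length then (aFind tok ss (tok.length - ss.length) 0).map (fun i => (i, ss.length))
  else none

theorem aFind_first (tok ss : List Int) (b j i : Nat) (hj : j ≤ i) (hi : i < b)
    (hp : (tok.drop i).take ss.length = ss)
    (hmin : ∀ k, j ≤ k → k < i → (tok.drop k).take ss.length ≠ ss) :
    aFind tok ss b j = some i := by
  fun_induction aFind tok ss b j with
  | case1 j hb hp' =>
    rcases Nat.eq_or_lt_of_le hj with h' | h'
    · rw [h']
    · exact absurd hp' (hmin j le_rfl h')
  | case2 j hb hp' ih =>
    have hji : j ≠ i := fun h => hp' (h ▸ hp)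
    exact ih (by omega) (fun k hk1 hk2 => hmin k (by omega) hk2)
  | case3 j hb => omega

theorem aFind_some (tok ss : List Int) (b j i : Nat) (h : aFind tok ss b j = some i) :
    i < b ∧ (tok.drop i).take ss.length = ss := by
  fun_induction aFind tok ss b j with
  | case1 j hb hp =>
    obtain rfl : j = i := by simpa using h
    exact ⟨hb, hp⟩
  | case2 j hb hp ih => exact ih h
  | case3 j hb => simp at h

theorem aEntry_some (tok ss : List Int) (i ls : Nat) (h : aEntry tok ss = some (i, ls)) :
    Good tok i ss ∧ ls = ss.length := by
  unfold aEntry at h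
  split at h
  · rename_i hls
    rcases hf : aFind tok ss (tok.length - ss.length) 0 with _ | i'
    · rw [hf] at h; simp at h
    · rw [hf] at h
      simp only [Option.map_some, Option.some.injEq, Prod.mk.injEq] at h
      obtain ⟨rfl, rfl⟩ := h
      obtain ⟨hb, hp⟩ := aFind_some tok ss _ 0 i' hf
      exact ⟨⟨hls, by omega, hp⟩, rfl⟩
  · simp at h

-- matches list is a filterMap of aEntry
theorem matches_eq_filterMap (tok : List Int) (subs : List (List Int)) (acc : List (Nat × Nat)) :
    subs.foldl (fun acc sub_seq =>
      if 0 < sub_seq.length then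
        match aFind tok sub_seq (tok.length - sub_seq.length) 0 with
        | some i => acc ++ [(i, sub_seq.length)]
        | none => acc
      else acc) acc = acc ++ subs.filterMap (aEntry tok) := by
  induction subs generalizing acc with
  | nil => simp
  | cons ss rest ih =>
    simp only [List.foldl_cons, List.filterMap_cons]
    unfold aEntry
    split
    · rcases hf : aFind tok ss (tok.length - ss.length) 0 with _ | i
      · simpa using ih acc
      · simpa using ih (acc ++ [(i, ss.length)])
    · simpa using ih acc

-- min-by-first fold lemmas
theorem fold_min_all_ge (acc : Nat × Nat) (L : List (Nat × Nat)) (h : ∀ t ∈ L, acc.1 ≤ t.1) :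
    L.foldl (fun b t => if t.1 < b.1 then t else b) acc = acc := by
  induction L generalizing acc with
  | nil => rfl
  | cons t rest ih =>
    simp only [List.foldl_cons]
    have ht : ¬ t.1 < acc.1 := by
      have := h t (by simp); omega
    rw [if_neg ht]
    exact ih acc (fun t' ht' => h t' (by simp [ht']))

theorem fold_min_reach (i l : Nat) (P Q : List (Nat × Nat)) (acc : Nat × Nat)
    (hacc : i < acc.1) (hP : ∀ t ∈ P, i < t.1) (hQ : ∀ t ∈ Q, i ≤ t.1) :
    (P ++ (i, l) :: Q).foldl (fun b t => if t.1 < b.1 then t else b) acc = (i, l) := by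
  induction P generalizing acc with
  | nil =>
    simp only [List.nil_append, List.foldl_cons, hacc, if_pos]
    exact fold_min_all_ge (i, l) Q hQ
  | cons p P' ih =>
    simp only [List.cons_append, List.foldl_cons]
    have hp : i < p.1 := hP p (by simp)
    have hstep : i < (if p.1 < acc.1 then p else acc).1 := by
      split <;> omega
    exact ih _ hstep (fun t ht => hP t (by simp [ht]))

theorem altInner_none_iff (tok : List Int) (i : Nat) (subs : List (List Int)) :
    altInner tok i subs = none ↔ ∀ ss ∈ subs, ¬ Good tok i ss := by
  induction subs with
  | nil => simp [altInner]
  | cons ss rest ih =>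
    simp only [altInner]
    split
    · rename_i hg
      simp only [reduceCtorEq, false_iff]
      push Not
      exact ⟨ss, by simp, hg⟩
    · rename_i hg
      rw [ih]
      constructor
      · intro h s hs
        rcases List.mem_cons.mp hs with rfl | hs'
        · exact hg
        · exact h s hs'
      · intro h s hs
        exact h s (List.mem_cons_of_mem _ hs)

theorem altInner_some (tok : List Int) (i : Nat) (subs : List (List Int)) (r : List Int)
    (h : altInner tok i subs = some r) :
    ∃ P ss Q, subs = P ++ ss :: Q ∧ (∀ s ∈ P, ¬ Good tok i s) ∧ Good tok i ss ∧
      r = tok.take (i + ss.length) := by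
  induction subs with
  | nil => simp [altInner] at h
  | cons s rest ih =>
    simp only [altInner] at h
    split at h
    · rename_i hg
      refine ⟨[], s, rest, rfl, by simp, hg, ?_⟩
      simpa using h.symm
    · rename_i hg
      obtain ⟨P, ss, Q, hsplit, hP, hgood, hr⟩ := ih h
      exact ⟨s :: P, ss, Q, by simp [hsplit], by
        intro t ht
        rcases List.mem_cons.mp ht with rfl | ht'
        · exact hg
        · exact hP t ht', hgood, hr⟩

-- A's result, rewritten through the filterMap characterization of match_indexes
theorem A_eq (tok : List Int) (subs : List (List Int)) :
    to_first_match_py tok subs =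
      match subs.filterMap (aEntry tok) with
      | [] => tok
      | m :: rest =>
        let best := rest.foldl (fun b t => if t.1 < b.1 then t else b) m
        tok.take (best.1 + best.2) := by
  simp only [to_first_match_py]
  rw [matches_eq_filterMap tok subs []]
  simp

theorem A_none (tok : List Int) (subs : List (List Int))
    (h : ∀ j, ∀ ss ∈ subs, ¬ Good tok j ss) :
    to_first_match_py tok subs = tok := by
  rw [A_eq]
  have hnil : subs.filterMap (aEntry tok) = [] := by
    rw [List.filterMap_eq_nil_iff]
    intro ss hss
    rcases he : aEntry tok ss with _ | ⟨j, ls⟩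
    · rfl
    · exact absurd (aEntry_some tok ss j ls he).1 (h j ss hss)
  rw [hnil]

theorem A_some (tok : List Int) (subs : List (List Int)) (i : Nat) (r : List Int)
    (hbelow : ∀ j < i, ∀ ss ∈ subs, ¬ Good tok j ss)
    (h : altInner tok i subs = some r) :
    to_first_match_py tok subs = r := by
  obtain ⟨P, ss₀, Q, rfl, hP, hgood, hr⟩ := altInner_some tok i subs r h
  obtain ⟨hls, hlen, hsl⟩ := hgood
  have hE : aEntry tok ss₀ = some (i, ss₀.length) := by
    unfold aEntry
    rw [if_pos hls]
    rw [aFind_first tok ss₀ (tok.length - ss₀.length) 0 i (by omega) (by omega) hsl ?_]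
    · rfl
    · intro k _ hk hke
      exact hbelow k hk ss₀ (by simp) ⟨hls, by omega, hke⟩
  rw [A_eq]
  rw [List.filterMap_append, List.filterMap_cons, hE]
  have hPf : ∀ t ∈ P.filterMap (aEntry tok), i < t.1 := by
    intro t ht
    obtain ⟨s, hs, he⟩ := List.mem_filterMap.mp ht
    obtain ⟨hg, _⟩ := aEntry_some tok s t.1 t.2 (by simpa using he)
    rcases Nat.lt_trichotomy t.1 i with h' | h' | h'
    · exact absurd hg (hbelow t.1 h' s (by simp [hs]))
    · exact absurd (h' ▸ hg) (hP s hs)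
    · exact h'
  have hQf : ∀ t ∈ Q.filterMap (aEntry tok), i ≤ t.1 := by
    intro t ht
    obtain ⟨s, hs, he⟩ := List.mem_filterMap.mp ht
    obtain ⟨hg, _⟩ := aEntry_some tok s t.1 t.2 (by simpa using he)
    by_contra hc
    exact absurd hg (hbelow t.1 (by omega) s (by simp [hs]))
  rcases hPc : P.filterMap (aEntry tok) with _ | ⟨p, P'⟩
  · simp only [List.nil_append]
    rw [fold_min_all_ge (i, ss₀.length) _ hQf]
    exact hr.symm
  · simp only [List.cons_append]
    rw [fold_min_reach i ss₀.length P' (Q.filterMap (aEntry tok)) p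
        (hPf p (by simp [hPc])) (fun t ht => hPf t (by simp [hPc, ht])) hQf]
    exact hr.symm

theorem main_loop (tok : List Int) (subs : List (List Int)) (i : Nat)
    (hbelow : ∀ j < i, ∀ ss ∈ subs, ¬ Good tok j ss) :
    altLoop tok subs i = to_first_match_py tok subs := by
  fun_induction altLoop tok subs i with
  | case1 i hi r hsome => exact (A_some tok subs i r hbelow hsome).symm
  | case2 i hi hnone ih =>
    apply ih
    intro j hj ss hss
    rcases Nat.lt_or_ge j i with h' | h'
    · exact hbelow j h' ss hss
    · have : j = i := by omega
      exact this ▸ (altInner_none_iff tok i subs).mp hnone ss hss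
  | case3 i hi =>
    refine (A_none tok subs ?_).symm
    intro j ss hss hg
    obtain ⟨h1, h2, h3⟩ := hg
    exact hbelow j (by omega) ss hss ⟨h1, h2, h3⟩

-- ===== VERDICT (by name: the statement is the Claim_ definition above) =====
theorem to_first_match_py_spec : Claim_equal_to_first_match_py := by
  intro tok subs _
  unfold Spec_to_first_match_py to_first_match_py_alt
  exact (main_loop tok subs 0 (by omega)).symm
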